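-- pv_equiv track=rewrite | github.com/lopuhin/ru-jungle | taiga.py | clean_subtitles_lines
-- ===== SOURCE A (Python) =====
-- from typing import List, Dict
--
-- def clean_subtitles_lines(lines: List[str]) -> List[str]:
--     cleaned = []
--     for i, line in enumerate(lines):
--         line = line.strip()
--         next_line = '' if i == len(lines) - 1 else lines[i + 1]
--         prev_line = '' if i == 0 else lines[i - 1]
--         # remove ... \n ...
--         if line.endswith('...') and next_line.startswith('...'):
--             line = line.rstrip('...').strip()
--         if line.startswith('...') and prev_line.endswith('...'):
--             line = line.lstrip('...').strip()
--         # join lines starting with lower case letter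
--         # (but lines with ... are not joined)
--         if (i and line and cleaned and
--                 line[0].isalpha() and line[0].islower() and
--                 not cleaned[-1].endswith('.')):
--             cleaned[-1] = cleaned[-1] + ' ' + line
--         else:
--             cleaned.append(line)
--     return cleaned
-- ===== SOURCE B (Python) =====
-- def clean_subtitles_lines(lines):
--     n = len(lines)
--     ts = []
--     for i, raw in enumerate(lines):
--         t = raw.strip()
--         nxt = lines[i + 1] if i + 1 < n else ''
--         prv = lines[i - 1] if i else ''
--         if t.endswith('...') and nxt.startswith('...'):
--             t = t.rstrip('.').strip()
--         if t.startswith('...') and prv.endswith('...'):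
--             t = t.lstrip('.').strip()
--         ts.append(t)
--
--     def joinable(j):
--         t = ts[j]
--         return bool(t) and t[0].isalpha() and t[0].islower() \
--             and not ts[j - 1].endswith('.')
--
--     out = []
--     i = 0
--     while i < n:
--         j = i + 1
--         buf = ts[i]
--         while j < n and joinable(j):
--             buf = buf + ' ' + ts[j]
--             j += 1
--         out.append(buf)
--         i = j
--     return out
-- ===== Notes on version B (the rewrite author's own statement) =====
-- stated objective: alternative
-- what changed: B replaces A's single stateful fold that mutates cleaned[-1] by segmentation: it precomputes the trimmed lines, then a nested index loop cuts them into runs at positions where a pure 'joinable' predicate (reading only the trimmed neighbour, never the output accumulator) fails, emitting each run joined with spaces.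
import Mathlib
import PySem

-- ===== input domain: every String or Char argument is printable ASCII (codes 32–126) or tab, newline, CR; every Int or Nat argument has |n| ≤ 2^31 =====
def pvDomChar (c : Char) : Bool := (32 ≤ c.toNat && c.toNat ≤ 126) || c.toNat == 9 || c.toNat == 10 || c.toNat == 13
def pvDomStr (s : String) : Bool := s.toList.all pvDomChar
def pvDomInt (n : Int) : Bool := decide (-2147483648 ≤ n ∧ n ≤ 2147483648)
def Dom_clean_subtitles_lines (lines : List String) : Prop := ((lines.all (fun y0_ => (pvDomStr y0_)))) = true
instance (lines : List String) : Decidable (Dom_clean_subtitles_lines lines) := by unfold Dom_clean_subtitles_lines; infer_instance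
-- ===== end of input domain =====

-- B computes the cleaned lines by segmentation (precompute trimmed lines, then cut them into runs with a pure joinable predicate and emit each run space-joined) instead of A's single stateful fold mutating cleaned[-1]; same return value, no speed claim.


-- ===== PORT A =====
-- shared primitive ports of Python str built-ins used by BOTH sources:
-- s.rstrip('...') / s.lstrip('...') strip the char set {'.'} from the end / start (exact):
def pvRstripDots (s : String) : String := String.ofList ((s.toList.reverse.dropWhile (fun c => c == '.')).reverse)
def pvLstripDots (s : String) : String := String.ofList (s.toList.dropWhile (fun c => c == '.'))
-- t[0].isalpha() and t[0].islower() (only reached when the string is nonempty):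
def pvHeadLowerAlpha (s : String) : Bool :=
  match s.toList with
  | [] => false
  | c :: _ => PySem.Chars.isalpha c && PySem.Chars.islower c
-- Python '+' on str (kernel-transparent, unlike String.append):
def pvCat (a b : String) : String := String.ofList (a.toList ++ b.toList)

-- loop body of A (the indices i+1, i-1 are in range whenever read, so getD's default is never used)
def pvStepA (lines : List String) (cleaned : List String) (i : Int) (line0 : String) : List String :=
  let line1 := PySem.Str.strip line0
  let next_line := if i = (lines.length : Int) - 1 then "" else PySem.List.pyGetD lines (i + 1) ""
  let prev_line := if i = 0 then "" else PySem.List.pyGetD lines (i - 1) ""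
  let line2 := if PySem.Str.endswith line1 "..." = true ∧ PySem.Str.startswith next_line "..." = true then
      PySem.Str.strip (pvRstripDots line1) else line1
  let line3 := if PySem.Str.startswith line2 "..." = true ∧ PySem.Str.endswith prev_line "..." = true then
      PySem.Str.strip (pvLstripDots line2) else line2
  if i ≠ 0 ∧ line3 ≠ "" ∧ cleaned ≠ [] ∧ pvHeadLowerAlpha line3 = true ∧
      ¬ PySem.Str.endswith (cleaned.getLastD "") "." = true then
    cleaned.dropLast ++ [pvCat (pvCat (cleaned.getLastD "") " ") line3]
  else
    cleaned ++ [line3]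

def clean_subtitles_lines (lines : List String) : List String :=
  (PySem.List.enumerate lines).foldl (fun cleaned p => pvStepA lines cleaned p.1 p.2) []

-- ===== PORT B =====
-- first pass of Source B: the trimmed line at index i (ts[i])
def pvTransformB (lines : List String) (n : Nat) (i : Nat) : String :=
  let t0 := PySem.Str.strip (lines.getD i "")
  let t1 := if PySem.Str.endswith t0 "..." = true ∧
      PySem.Str.startswith (if i + 1 < n then lines.getD (i + 1) "" else "") "..." = true then
      PySem.Str.strip (pvRstripDots t0) else t0
  let t2 := if PySem.Str.startswith t1 "..." = true ∧
      PySem.Str.endswith (if i ≠ 0 then lines.getD (i - 1) "" else "") "..." = true then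
      PySem.Str.strip (pvLstripDots t1) else t1
  t2

-- joinable(j) of Source B: a pure predicate on the trimmed lines (never on the output)
def pvJoinable (ts : List String) (j : Nat) : Bool :=
  (ts.getD j "" ≠ "" : Bool) && pvHeadLowerAlpha (ts.getD j "") &&
    !(PySem.Str.endswith (ts.getD (j - 1) "") ".")

-- the nested while loops of Source B: pvGroupB is the inner loop (extend the current
-- run's buffer), pvRecB is the outer loop (start a run at each segment start)
mutual
  def pvGroupB (ts : List String) (j : Nat) (buf : String) : List String :=
    if j < ts.length ∧ pvJoinable ts j = true then
      pvGroupB ts (j + 1) (pvCat (pvCat buf " ") (ts.getD j ""))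
    else buf :: pvRecB ts j
  termination_by 2 * (ts.length - j) + 1
  decreasing_by all_goals omega
  def pvRecB (ts : List String) (i : Nat) : List String :=
    if i < ts.length then pvGroupB ts (i + 1) (ts.getD i "") else []
  termination_by 2 * (ts.length - i)
  decreasing_by all_goals omega
end

def clean_subtitles_lines_alt (lines : List String) : List String :=
  let n := lines.length
  let ts := (List.range n).map (pvTransformB lines n)
  pvRecB ts 0

-- ===== PRECONDITION & SPEC =====
def Spec_clean_subtitles_lines (lines : List String) (out : List String) : Prop := out = clean_subtitles_lines_alt lines
instance (lines : List String) (out : List String) : Decidable (Spec_clean_subtitles_lines lines out) := by unfold Spec_clean_subtitles_lines; infer_instance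

-- ===== CLAIM (what is proved, stated in full; the proofs are below) =====
def Claim_equal_clean_subtitles_lines : Prop := ∀ (lines : List String), Dom_clean_subtitles_lines lines → Spec_clean_subtitles_lines lines (clean_subtitles_lines lines)

-- ===== LEMMAS AND PROOFS =====

-- the trimmed list computed by B's first pass (proof-side name for it)
def pvT (lines : List String) : List String := (List.range lines.length).map (pvTransformB lines lines.length)

-- proof-side intermediate loop body: A's step with the accumulator test replaced
-- by a lookup into the trimmed list (bridged to A by an invariant, to B by induction)
def pvStepB (transformed : List String) (cleaned : List String) (i : Int) (t : String) : List String :=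
  if i ≠ 0 ∧ t ≠ "" ∧ pvHeadLowerAlpha t = true ∧
      ¬ PySem.Str.endswith (PySem.List.pyGetD transformed (i - 1) "") "." = true then
    cleaned.dropLast ++ [pvCat (pvCat (cleaned.getLastD "") " ") t]
  else
    cleaned ++ [t]

theorem pvT_length (lines : List String) : (pvT lines).length = lines.length := by
  simp [pvT]

theorem pvT_getD (lines : List String) (k : Nat) (hk : k < lines.length) :
    (pvT lines).getD k "" = pvTransformB lines lines.length k := by
  simp [pvT, List.getD, hk]

theorem pvSuffix_singleton (l : List Char) (c : Char) : [c] <:+ l ↔ l.getLast? = some c := by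
  constructor
  · rintro ⟨t, rfl⟩; simp
  · rw [List.getLast?_eq_some_iff]; rintro ⟨t, rfl⟩; exact ⟨t, rfl⟩

theorem pvEndswithDot_cat (a b : String) (hb : b ≠ "") :
    PySem.Str.endswith (pvCat a b) "." = PySem.Str.endswith b "." := by
  have hb' : b.toList ≠ [] := fun h => hb (String.toList_eq_nil_iff.mp h)
  have h1 : (pvCat a b).toList = a.toList ++ b.toList := String.toList_ofList
  rw [Bool.eq_iff_iff]
  simp only [PySem.Str.endswith_eq, h1]
  have hdot : (".").toList = ['.'] := rfl
  rw [hdot, PySem.Chars.endswith_iff, PySem.Chars.endswith_iff,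
    pvSuffix_singleton, pvSuffix_singleton, List.getLast?_append_of_ne_nil a.toList hb']

-- invariant of one pvStepB step: the result is nonempty and its last element ends with '.' iff t does
theorem pvStepB_invariant (T cleaned : List String) (k : Int) (t : String) :
    pvStepB T cleaned k t ≠ [] ∧
      PySem.Str.endswith ((pvStepB T cleaned k t).getLastD "") "." = PySem.Str.endswith t "." := by
  unfold pvStepB
  split_ifs with h
  · refine ⟨by simp, ?_⟩
    rw [List.getLastD_concat]
    exact pvEndswithDot_cat _ t h.2.1
  · exact ⟨by simp, by rw [List.getLastD_concat]⟩

-- one step of A equals one pvStepB step, under the loop invariant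
theorem pvStep_eq (lines : List String) (k : Nat) (hk : k < lines.length) (cleaned : List String)
    (hne : k ≠ 0 → cleaned ≠ [])
    (hlast : k ≠ 0 → PySem.Str.endswith (cleaned.getLastD "") "." =
      PySem.Str.endswith ((pvT lines).getD (k - 1) "") ".") :
    pvStepA lines cleaned (k : Int) (lines.getD k "") =
      pvStepB (pvT lines) cleaned (k : Int) ((pvT lines).getD k "") := by
  have hnext : (if (k : Int) = (lines.length : Int) - 1 then "" else PySem.List.pyGetD lines ((k : Int) + 1) "")
      = (if k + 1 < lines.length then lines.getD (k + 1) "" else "") := by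
    by_cases h : k + 1 < lines.length
    · rw [if_neg (by omega), if_pos h]
      rw [show ((k : Int) + 1) = ((k + 1 : Nat) : Int) by push_cast; ring, PySem.List.pyGetD_natCast]
    · rw [if_pos (by omega), if_neg h]
  have hprev : (if (k : Int) = 0 then "" else PySem.List.pyGetD lines ((k : Int) - 1) "")
      = (if k ≠ 0 then lines.getD (k - 1) "" else "") := by
    by_cases h : k = 0
    · subst h; simp
    · rw [if_neg (by omega), if_pos h]
      rw [show ((k : Int) - 1) = ((k - 1 : Nat) : Int) by omega, PySem.List.pyGetD_natCast]
  rw [pvT_getD lines k hk]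
  simp only [pvStepA, pvTransformB, hnext, hprev]
  by_cases h0 : k = 0
  · subst h0
    simp [pvStepB]
  · have hcl : cleaned ≠ [] := hne h0
    have hl := hlast h0
    unfold pvStepB
    rw [show ((k : Int) - 1) = ((k - 1 : Nat) : Int) by omega, PySem.List.pyGetD_natCast]
    apply if_congr _ rfl rfl
    constructor
    · rintro ⟨h1, h2, _, h4, h5⟩
      exact ⟨h1, h2, h4, by rw [← hl]; exact h5⟩
    · rintro ⟨h1, h2, h4, h5⟩
      exact ⟨h1, h2, hcl, h4, by rw [hl]; exact h5⟩

-- first induction: A's fold equals the pvStepB fold over the trimmed list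
theorem pvFold_eq (lines : List String) : ∀ (m k : Nat) (cleaned : List String),
    lines.length - k = m → k ≤ lines.length →
    (k ≠ 0 → cleaned ≠ []) →
    (k ≠ 0 → PySem.Str.endswith (cleaned.getLastD "") "." =
      PySem.Str.endswith ((pvT lines).getD (k - 1) "") ".") →
    List.foldl (fun c p => pvStepA lines c p.1 p.2) cleaned (PySem.List.enumerate (lines.drop k) k)
      = List.foldl (fun c p => pvStepB (pvT lines) c p.1 p.2) cleaned
          (PySem.List.enumerate ((pvT lines).drop k) k) := by
  intro m
  induction m with
  | zero =>
    intro k cleaned hm hle _ _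
    have hk : k = lines.length := by omega
    have h1 : lines.drop k = [] := by rw [hk]; simp
    have h2 : (pvT lines).drop k = [] := by
      apply List.drop_eq_nil_of_le; rw [pvT_length]; omega
    rw [h1, h2]
    simp [PySem.List.enumerate_nil]
  | succ m ih =>
    intro k cleaned hm hle hne hlast
    have hk : k < lines.length := by omega
    have hk' : k < (pvT lines).length := by rw [pvT_length]; omega
    rw [List.drop_eq_getElem_cons hk, List.drop_eq_getElem_cons hk',
      PySem.List.enumerate_cons, PySem.List.enumerate_cons, List.foldl_cons, List.foldl_cons]
    have hgA : lines[k] = lines.getD k "" := (List.getD_eq_getElem lines "" hk).symm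
    have hgB : (pvT lines)[k] = (pvT lines).getD k "" := (List.getD_eq_getElem (pvT lines) "" hk').symm
    rw [hgA, hgB, pvStep_eq lines k hk cleaned hne hlast]
    have hcast : (k : Int) + 1 = ((k + 1 : Nat) : Int) := by push_cast; ring
    rw [hcast]
    obtain ⟨hne', hlast'⟩ := pvStepB_invariant (pvT lines) cleaned (k : Int) ((pvT lines).getD k "")
    exact ih (k + 1) _ (by omega) (by omega) (fun _ => hne')
      (fun _ => by simpa using hlast')

-- second induction: the pvStepB fold equals B's nested-loop segmentation
theorem pvFoldB_group (ts : List String) : ∀ (m k : Nat) (acc : List String) (buf : String),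
    ts.length - k = m → 1 ≤ k →
    List.foldl (fun c p => pvStepB ts c p.1 p.2) (acc ++ [buf]) (PySem.List.enumerate (ts.drop k) k)
      = acc ++ pvGroupB ts k buf := by
  intro m
  induction m with
  | zero =>
    intro k acc buf hm hk1
    have hk : ts.length ≤ k := by omega
    rw [List.drop_eq_nil_of_le hk]
    rw [pvGroupB, if_neg (by omega), pvRecB, if_neg (by omega)]
    simp [PySem.List.enumerate_nil]
  | succ m ih =>
    intro k acc buf hm hk1
    have hk : k < ts.length := by omega
    rw [List.drop_eq_getElem_cons hk, PySem.List.enumerate_cons, List.foldl_cons]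
    have hg : ts[k] = ts.getD k "" := (List.getD_eq_getElem ts "" hk).symm
    have hcast : (k : Int) + 1 = ((k + 1 : Nat) : Int) := by push_cast; ring
    have hcast1 : (k : Int) - 1 = ((k - 1 : Nat) : Int) := by omega
    by_cases hj : pvJoinable ts k = true
    · have hj' := hj
      unfold pvJoinable at hj'
      simp only [Bool.and_eq_true, decide_eq_true_eq, Bool.not_eq_eq_eq_not, Bool.not_true] at hj'
      rw [hg]
      have hstep : pvStepB ts (acc ++ [buf]) (k : Int) (ts.getD k "")
          = acc ++ [pvCat (pvCat buf " ") (ts.getD k "")] := by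
        unfold pvStepB
        rw [if_pos]
        · rw [List.dropLast_concat, List.getLastD_concat]
        · refine ⟨by omega, hj'.1.1, hj'.1.2, ?_⟩
          rw [hcast1, PySem.List.pyGetD_natCast, hj'.2]
          simp
      rw [hstep, hcast, ih (k + 1) acc _ (by omega) (by omega)]
      conv_rhs => rw [pvGroupB]
      rw [if_pos ⟨hk, hj⟩]
    · have hj' := hj
      unfold pvJoinable at hj'
      rw [hg]
      have hstep : pvStepB ts (acc ++ [buf]) (k : Int) (ts.getD k "")
          = (acc ++ [buf]) ++ [ts.getD k ""] := by
        unfold pvStepB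
        rw [if_neg]
        intro ⟨_, h2, h4, h5⟩
        apply hj'
        rw [hcast1, PySem.List.pyGetD_natCast] at h5
        simp only [Bool.and_eq_true, decide_eq_true_eq]
        refine ⟨⟨h2, h4⟩, ?_⟩
        simpa using h5
      rw [hstep, hcast, ih (k + 1) (acc ++ [buf]) _ (by omega) (by omega)]
      conv_rhs => rw [pvGroupB]
      rw [if_neg (fun h => hj h.2), pvRecB, if_pos hk]
      simp

-- ===== VERDICT (by name: the statement is the Claim_ definition above) =====
theorem clean_subtitles_lines_spec : Claim_equal_clean_subtitles_lines := by
  intro lines _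
  unfold Spec_clean_subtitles_lines
  have hA : clean_subtitles_lines lines
      = List.foldl (fun c p => pvStepB (pvT lines) c p.1 p.2) []
          (PySem.List.enumerate ((pvT lines).drop 0) ((0 : Nat) : Int)) := by
    have h0 : clean_subtitles_lines lines
        = List.foldl (fun c p => pvStepA lines c p.1 p.2) []
            (PySem.List.enumerate (lines.drop 0) ((0 : Nat) : Int)) := by
      simp only [clean_subtitles_lines, List.drop_zero, Nat.cast_zero]
    rw [h0]
    exact pvFold_eq lines lines.length 0 [] (by omega) (by omega)
      (fun h => absurd rfl h) (fun h => absurd rfl h)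
  have hB : clean_subtitles_lines_alt lines = pvRecB (pvT lines) 0 := rfl
  rw [hA, hB]
  rcases Nat.eq_zero_or_pos lines.length with h0 | h0
  · have hnil : pvT lines = [] := by
      have := pvT_length lines; rw [h0] at this
      exact List.eq_nil_of_length_eq_zero this
    rw [hnil, pvRecB]
    simp [PySem.List.enumerate_nil]
  · have hk : 0 < (pvT lines).length := by rw [pvT_length]; omega
    rw [List.drop_eq_getElem_cons hk, PySem.List.enumerate_cons, List.foldl_cons]
    have hstep0 : pvStepB (pvT lines) [] ((0 : Nat) : Int) (pvT lines)[0]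
        = [] ++ [(pvT lines).getD 0 ""] := by
      unfold pvStepB
      rw [if_neg (by intro h; exact h.1 (by norm_num))]
      rw [(List.getD_eq_getElem (pvT lines) "" hk).symm]
    rw [hstep0]
    have hc : ((0 : Nat) : Int) + 1 = ((1 : Nat) : Int) := by norm_num
    have h01 : (0 : Nat) + 1 = 1 := rfl
    rw [hc, h01, pvFoldB_group (pvT lines) ((pvT lines).length - 1) 1 [] _ (by omega) (by omega)]
    rw [pvRecB, if_pos hk]
    simp
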